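-- pv_equiv track=rewrite | github.com/irisruip/Programacion_Matematica | Tarea/tarea.py | asignar_tareas
-- ===== SOURCE A (Python) =====
-- def encontrar_ceros_cubiertos(matriz, filas_cubiertas, columnas_cubiertas):
--     #Encuentra los ceros no cubiertos por las líneas y devuelve sus coordenadas.
--
--     for i in range(len(matriz)):
--         if not filas_cubiertas[i]:
--             for j in range(len(matriz[i])):
--                 if matriz[i][j] == 0 and not columnas_cubiertas[j]:
--                     return i, j
--     return None
--
-- def asignar_tareas(matriz):
--
--     #método húngaro para encontrar la asignación óptima.
--
--     N, M = len(matriz), len(matriz[0])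
--     asignaciones = [-1] * M
--     filas_cubiertas = [False] * N
--     columnas_cubiertas = [False] * M
--
--     while True:
--         cero = encontrar_ceros_cubiertos(matriz, filas_cubiertas, columnas_cubiertas)
--         if cero is None:
--             break
--         i, j = cero
--         asignaciones[j] = i
--         filas_cubiertas[i] = True
--         columnas_cubiertas[j] = True
--
--     return asignaciones
-- ===== SOURCE B (Python) =====
-- def asignar_tareas(matriz):
--     # Single row-major pass: assign each row's first zero in a still-uncovered
--     # column, marking that column covered.  O(N*M) instead of A's repeated
--     # full rescans.
--     M = len(matriz[0])
--     asignaciones = [-1] * M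
--     cubiertas = [False] * M
--     for i, fila in enumerate(matriz):
--         for j in range(min(len(fila), M)):
--             if fila[j] == 0 and not cubiertas[j]:
--                 asignaciones[j] = i
--                 cubiertas[j] = True
--                 break
--     return asignaciones
-- ===== Notes on version B (the rewrite author's own statement) =====
-- stated objective: faster
-- what changed: Replaces A's while-loop that rescans the whole matrix from the top after every assignment with a single row-major pass that assigns each row's first zero in an uncovered column and marks the column covered.
-- outside the precondition, e.g. on asignar_tareas([[5], [0, 0]]): A returns [1], B returns [1]
import Mathlib
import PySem

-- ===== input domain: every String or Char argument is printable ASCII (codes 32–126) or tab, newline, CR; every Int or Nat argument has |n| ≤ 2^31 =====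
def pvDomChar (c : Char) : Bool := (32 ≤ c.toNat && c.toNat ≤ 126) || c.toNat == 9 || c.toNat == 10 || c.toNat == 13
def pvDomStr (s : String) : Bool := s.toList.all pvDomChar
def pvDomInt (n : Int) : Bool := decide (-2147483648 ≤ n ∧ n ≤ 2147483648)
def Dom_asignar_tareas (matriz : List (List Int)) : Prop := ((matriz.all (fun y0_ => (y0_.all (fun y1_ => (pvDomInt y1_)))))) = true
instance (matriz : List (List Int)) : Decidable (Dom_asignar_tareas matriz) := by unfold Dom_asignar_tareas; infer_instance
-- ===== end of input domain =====

-- B replaces A's repeated full-matrix rescans with one row-major pass (one assignment attempt per row).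

-- ===== PORT A =====
-- inner loop of encontrar_ceros_cubiertos: first j with matriz[i][j] == 0 and not columnas_cubiertas[j]
def findInRow : List Int → Nat → List Bool → Option Nat
  | [], _, _ => none
  | v :: rest, j, cub =>
    if v = 0 ∧ cub.getD j false = false then some j else findInRow rest (j+1) cub

-- encontrar_ceros_cubiertos: scan rows from the top, skipping covered rows
def findZero : List (List Int) → Nat → List Bool → List Bool → Option (Nat × Nat)
  | [], _, _, _ => none
  | fila :: rest, i, filas, cub =>
    if filas.getD i false = false then
      match findInRow fila 0 cub with
      | some j => some (i, j)
      | none => findZero rest (i+1) filas cub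
    else findZero rest (i+1) filas cub

-- the while-True loop; each iteration covers a fresh row, so matriz.length + 1 fuel is never exhausted
def loopA : Nat → List (List Int) → List Bool → List Bool → List Int → List Int
  | 0, _, _, _, asig => asig
  | fuel+1, m, filas, cub, asig =>
    match findZero m 0 filas cub with
    | none => asig
    | some (i, j) => loopA fuel m (filas.set i true) (cub.set j true) (asig.set j (Int.ofNat i))

def asignar_tareas (matriz : List (List Int)) : List Int :=
  let M := (matriz.headD []).length
  loopA (matriz.length + 1) matriz (List.replicate matriz.length false)
    (List.replicate M false) (List.replicate M (-1))

-- ===== PORT B =====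
-- inner for-loop of Source B: first zero of the row (restricted to the first M columns) in an uncovered column
def procRow (i : Int) : List Int → Nat → List Bool → List Int → List Int × List Bool
  | [], _, cub, asig => (asig, cub)
  | v :: rest, j, cub, asig =>
    if v = 0 ∧ cub.getD j false = false then (asig.set j i, cub.set j true)
    else procRow i rest (j+1) cub asig

-- outer for-loop of Source B: one pass over the rows
def passRows (M : Nat) : List (List Int) → Nat → List Bool → List Int → List Int
  | [], _, _, asig => asig
  | fila :: rest, i, cub, asig =>
    let p := procRow (Int.ofNat i) (fila.take M) 0 cub asig
    passRows M rest (i+1) p.2 p.1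

def asignar_tareas_alt (matriz : List (List Int)) : List Int :=
  let M := (matriz.headD []).length
  passRows M matriz 0 (List.replicate M false) (List.replicate M (-1))

-- ===== PRECONDITION & SPEC =====
-- Pre_ excludes the empty matrix (matriz[0] raises IndexError) and ragged matrices holding a zero at a
-- column index ≥ len(matriz[0]), where A's indexing of columnas_cubiertas can raise IndexError.
def Pre_asignar_tareas (matriz : List (List Int)) : Prop :=
  matriz ≠ [] ∧ ∀ fila ∈ matriz, ∀ v ∈ fila.drop (matriz.headD []).length, v ≠ 0
instance (matriz : List (List Int)) : Decidable (Pre_asignar_tareas matriz) := by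
  unfold Pre_asignar_tareas; infer_instance
def pvWitness_asignar_tareas : List (List Int) := [[0, 1], [1, 0]]

def Spec_asignar_tareas (matriz : List (List Int)) (out : List Int) : Prop := out = asignar_tareas_alt matriz
instance (matriz : List (List Int)) (out : List Int) : Decidable (Spec_asignar_tareas matriz out) := by unfold Spec_asignar_tareas; infer_instance

-- ===== CLAIM (what is proved, stated in full; the proofs are below) =====
def Claim_equal_asignar_tareas : Prop := ∀ (matriz : List (List Int)), Dom_asignar_tareas matriz → Pre_asignar_tareas matriz → Spec_asignar_tareas matriz (asignar_tareas matriz)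

-- ===== LEMMAS AND PROOFS =====

theorem getD_set_self {l : List Bool} {i : Nat} (h : i < l.length) (a d : Bool) :
    (l.set i a).getD i d = a := by
  simp [List.getD_eq_getElem?_getD, h]

theorem getD_set_ne {l : List Bool} {i j : Nat} (h : i ≠ j) (a d : Bool) :
    (l.set i a).getD j d = l.getD j d := by
  simp [List.getD_eq_getElem?_getD, h]

theorem getD_set_true_false {l : List Bool} {j0 j : Nat}
    (h : (l.set j0 true).getD j false = false) : l.getD j false = false := by
  by_cases hj : j0 = j
  · subst hj
    by_cases hl : j0 < l.length
    · rw [getD_set_self hl] at h; exact absurd h (by simp)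
    · rwa [List.set_eq_of_length_le (Nat.le_of_not_lt hl)] at h
  · rwa [getD_set_ne hj] at h

theorem findInRow_set_none {fila : List Int} {j0 : Nat} {cub : List Bool} :
    ∀ {j : Nat}, findInRow fila j cub = none → findInRow fila j (cub.set j0 true) = none := by
  induction fila with
  | nil => intro j _; rfl
  | cons v rest ih =>
    intro j h
    simp only [findInRow] at h ⊢
    split
    · next hc =>
      rcases hc with ⟨hv, hget⟩
      rw [if_pos ⟨hv, getD_set_true_false hget⟩] at h
      simp at h
    · apply ih
      split at h
      · simp at h
      · exact h

theorem findInRow_nonzero_none {ys : List Int} (h : ∀ v ∈ ys, v ≠ 0) :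
    ∀ (j : Nat) (cub : List Bool), findInRow ys j cub = none := by
  induction ys with
  | nil => intro j cub; rfl
  | cons v rest ih =>
    intro j cub
    simp only [findInRow]
    rw [if_neg]
    · exact ih (fun w hw => h w (List.mem_cons_of_mem _ hw)) _ _
    · rintro ⟨hv, -⟩; exact h v (List.mem_cons_self) hv

theorem findInRow_append (xs ys : List Int) (cub : List Bool) :
    ∀ j : Nat, findInRow (xs ++ ys) j cub =
      (match findInRow xs j cub with
       | some r => some r
       | none => findInRow ys (j + xs.length) cub) := by
  induction xs with
  | nil => intro j; simp [findInRow]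
  | cons v rest ih =>
    intro j
    simp only [List.cons_append, findInRow]
    split
    · rfl
    · rw [ih (j+1)]
      have : j + 1 + rest.length = j + (rest.length + 1) := by omega
      simp [this]

theorem findInRow_take {fila : List Int} {M : Nat}
    (h : ∀ v ∈ fila.drop M, v ≠ 0) (j : Nat) (cub : List Bool) :
    findInRow fila j cub = findInRow (fila.take M) j cub := by
  conv_lhs => rw [← List.take_append_drop M fila]
  rw [findInRow_append]
  rw [findInRow_nonzero_none h]
  cases findInRow (List.take M fila) j cub <;> rfl

theorem procRow_eq (i : Int) (fila : List Int) (cub : List Bool) (asig : List Int) :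
    ∀ j : Nat, procRow i fila j cub asig =
      (match findInRow fila j cub with
       | none => (asig, cub)
       | some j1 => (asig.set j1 i, cub.set j1 true)) := by
  induction fila with
  | nil => intro j; rfl
  | cons v rest ih =>
    intro j
    simp only [procRow, findInRow]
    split
    · rfl
    · exact ih (j+1)

theorem findZero_none_of_settled {filas cub : List Bool} :
    ∀ (xs : List (List Int)) (k : Nat),
      (∀ idx, idx < xs.length →
        filas.getD (k + idx) false = true ∨ findInRow (xs.getD idx []) 0 cub = none) →
      findZero xs k filas cub = none := by
  intro xs
  induction xs with
  | nil => intro k _; rfl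
  | cons fila rest ih =>
    intro k h
    have h0 := h 0 (by simp)
    simp only [List.getD_cons_zero, Nat.add_zero] at h0
    have htail : ∀ idx, idx < rest.length →
        filas.getD (k + 1 + idx) false = true ∨ findInRow (rest.getD idx []) 0 cub = none := by
      intro idx hidx
      have := h (idx + 1) (by simpa using Nat.succ_lt_succ hidx)
      simpa [Nat.add_assoc, Nat.add_comm 1 idx] using this
    simp only [findZero]
    rcases h0 with h0 | h0
    · have hne : ¬ (filas.getD k false = false) := by rw [h0]; simp
      rw [if_neg hne]
      exact ih (k+1) htail
    · split
      · rw [h0]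
        exact ih (k+1) htail
      · exact ih (k+1) htail

theorem findZero_append (filas cub : List Bool) (xs ys : List (List Int)) :
    ∀ k : Nat, findZero (xs ++ ys) k filas cub =
      (match findZero xs k filas cub with
       | some r => some r
       | none => findZero ys (k + xs.length) filas cub) := by
  induction xs with
  | nil => intro k; simp [findZero]
  | cons fila rest ih =>
    intro k
    simp only [List.cons_append, findZero]
    have harith : k + 1 + rest.length = k + (rest.length + 1) := by omega
    split
    · split
      · rfl
      · rw [ih (k+1)]; simp [harith]
    · rw [ih (k+1)]; simp [harith]

theorem getD_take {m : List (List Int)} {i idx : Nat} (h : idx < i) :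
    (m.take i).getD idx [] = m.getD idx [] := by
  simp [List.getD_eq_getElem?_getD, h]

theorem main_invariant (m : List (List Int)) (M : Nat)
    (hpre : ∀ fila ∈ m, ∀ v ∈ fila.drop M, v ≠ 0) :
    ∀ (rest : List (List Int)) (fuel i : Nat) (filas cub : List Bool) (asig : List Int),
      rest = m.drop i →
      filas.length = m.length →
      rest.length + 1 ≤ fuel →
      (∀ i', i ≤ i' → filas.getD i' false = false) →
      (∀ i', i' < i → filas.getD i' false = true ∨ findInRow (m.getD i' []) 0 cub = none) →
      loopA fuel m filas cub asig = passRows M rest i cub asig := by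
  intro rest
  induction rest with
  | nil =>
    intro fuel i filas cub asig hdrop hlen hfuel hunc hset
    obtain ⟨f, rfl⟩ : ∃ f, fuel = f + 1 := ⟨fuel - 1, by omega⟩
    have hNi : m.length ≤ i := by
      have := congrArg List.length hdrop
      simp [List.length_drop] at this
      omega
    have hnone : findZero m 0 filas cub = none := by
      apply findZero_none_of_settled
      intro idx hidx
      simpa using hset idx (by omega)
    simp [loopA, hnone, passRows]
  | cons fila rest' ih =>
    intro fuel i filas cub asig hdrop hlen hfuel hunc hset
    -- facts about the decomposition
    have hlt : i < m.length := by
      have := congrArg List.length hdrop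
      simp [List.length_drop] at this
      omega
    have hdrop' : rest' = m.drop (i+1) := by
      have h1 : (m.drop i).drop 1 = m.drop (i+1) := by
        rw [List.drop_drop]
      rw [← h1, ← hdrop]
      rfl
    have hget : m.getD i [] = fila := by
      have h0 : m[i]? = some fila := by
        have : (m.drop i)[0]? = some fila := by rw [← hdrop]; rfl
        simpa [List.getElem?_drop] using this
      simp [List.getD_eq_getElem?_getD, h0]
    have hmem : fila ∈ m := by
      have : fila ∈ m.drop i := by rw [← hdrop]; exact List.mem_cons_self
      exact List.mem_of_mem_drop this
    have hfila := hpre fila hmem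
    obtain ⟨f, rfl⟩ : ∃ f, fuel = f + 1 := ⟨fuel - 1, by omega⟩
    have hskip : findZero m 0 filas cub = findZero (fila :: rest') i filas cub := by
      conv_lhs => rw [← List.take_append_drop i m, ← hdrop]
      rw [findZero_append]
      have hpref : findZero (m.take i) 0 filas cub = none := by
        apply findZero_none_of_settled
        intro idx hidx
        have hidx' : idx < i := by
          have : (m.take i).length = i := by simp [List.length_take]; omega
          omega
        rw [getD_take hidx']
        simpa using hset idx hidx'
      have hlenl : (m.take i).length = i := by simp [List.length_take]; omega
      simp [hpref, hlenl]
    cases hrow : findInRow fila 0 cub with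
    | none =>
      -- this row contributes nothing; move the frontier one step
      have lhs_eq : loopA (f+1) m filas cub asig = passRows M rest' (i+1) cub asig := by
        apply ih (f+1) (i+1) filas cub asig hdrop' hlen
        · have : rest'.length + 1 ≤ f + 1 := by
            have := hfuel; simp at this ⊢; omega
          exact this
        · intro i' hi'; exact hunc i' (by omega)
        · intro i' hi'
          rcases Nat.lt_or_ge i' i with h' | h'
          · exact hset i' h'
          · have : i' = i := by omega
            subst this
            right; rw [hget]; exact hrow
      rw [lhs_eq]
      simp only [passRows]
      rw [procRow_eq, ← findInRow_take hfila, hrow]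
    | some j0 =>
      have hstep : findZero m 0 filas cub = some (i, j0) := by
        rw [hskip]
        simp only [findZero]
        rw [if_pos (hunc i (Nat.le_refl i)), hrow]
      have lhs_eq : loopA (f+1) m filas cub asig
          = loopA f m (filas.set i true) (cub.set j0 true) (asig.set j0 (Int.ofNat i)) := by
        simp [loopA, hstep]
      rw [lhs_eq]
      have rhs_eq : passRows M (fila :: rest') i cub asig
          = passRows M rest' (i+1) (cub.set j0 true) (asig.set j0 (Int.ofNat i)) := by
        simp only [passRows]
        rw [procRow_eq, ← findInRow_take hfila, hrow]
      rw [rhs_eq]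
      apply ih f (i+1) _ _ _ hdrop' (by simp [hlen])
      · have := hfuel; simp at this ⊢; omega
      · intro i' hi'
        rw [getD_set_ne (by omega)]
        exact hunc i' (by omega)
      · intro i' hi'
        rcases Nat.lt_or_ge i' i with h' | h'
        · rcases hset i' h' with hs | hs
          · left; rw [getD_set_ne (by omega)]; exact hs
          · right; exact findInRow_set_none hs
        · have : i' = i := by omega
          subst this
          left
          rw [getD_set_self (by rw [hlen]; exact hlt)]

-- ===== VERDICT (by name: the statement is the Claim_ definition above) =====
theorem asignar_tareas_spec : Claim_equal_asignar_tareas := by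
  intro matriz _ hpre
  unfold Spec_asignar_tareas asignar_tareas asignar_tareas_alt
  apply main_invariant
  · exact hpre.2
  · simp
  · simp
  · omega
  · intro i' _
    simp [List.getD_eq_getElem?_getD, List.getElem?_replicate]
    split <;> rfl
  · intro i' h'; omega
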